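-- pv_equiv track=rewrite | github.com/ZhenyaGro/IntroductionPython | Seminar3/Task2.py | multiply_pairs
-- ===== SOURCE A (Python) =====
-- def multiply_pairs(array):
--     result = []
--
--     for i in range(0, len(array) // 2):
--         result.append(array[i] * array[-i - 1])
--
--     if len(array) % 2 == 1:
--         extra_element = array[len(array) // 2]
--         result.append(extra_element ** 2)
--
--     return result
-- ===== SOURCE B (Python) =====
-- def multiply_pairs(array):
--     n = len(array)
--     left = array[:(n + 1) // 2]
--     right = array[n // 2:][::-1]
--     return [x * y for x, y in zip(left, right)]
-- ===== Notes on version B (the rewrite author's own statement) =====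
-- stated objective: idiomatic
-- what changed: Instead of an indexed loop with mirror index arithmetic plus a separate odd-length branch, B slices the array into its first ceil(n/2) elements and the reversed last ceil(n/2) elements and multiplies them pointwise with zip; the shared middle element (odd n) pairs with itself automatically.
import Mathlib
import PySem

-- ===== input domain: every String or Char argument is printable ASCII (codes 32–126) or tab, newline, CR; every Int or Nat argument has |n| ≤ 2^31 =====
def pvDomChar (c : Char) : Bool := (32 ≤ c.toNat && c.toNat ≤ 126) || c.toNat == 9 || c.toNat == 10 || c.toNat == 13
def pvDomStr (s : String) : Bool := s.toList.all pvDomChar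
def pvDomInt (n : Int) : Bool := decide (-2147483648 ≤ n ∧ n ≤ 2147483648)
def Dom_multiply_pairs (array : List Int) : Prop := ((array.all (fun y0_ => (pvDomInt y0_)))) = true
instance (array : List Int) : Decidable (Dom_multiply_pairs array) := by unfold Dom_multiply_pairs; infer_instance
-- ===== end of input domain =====

-- ===== PORT A =====
-- One line: B replaces the mirror-indexed half-loop plus odd-length branch by a
-- pointwise zip of the front slice with the reversed back slice; objective: idiomatic.
def multiply_pairs (array : List Int) : List Int :=
  let result : List Int :=
    (PySem.List.pyRange 0 (PySem.Int.floordiv (array.length : Int) 2) 1).foldl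
      (fun r i => r ++ [PySem.List.pyGetD array i 0 * PySem.List.pyGetD array (-i - 1) 0]) []
  if PySem.Int.mod (array.length : Int) 2 = 1 then
    let extra_element := PySem.List.pyGetD array (PySem.Int.floordiv (array.length : Int) 2) 0
    result ++ [extra_element ^ 2]
  else result

-- ===== PORT B =====
def multiply_pairs_alt (array : List Int) : List Int :=
  let n : Int := (array.length : Int)
  let left := PySem.List.slice array none (some (PySem.Int.floordiv (n + 1) 2))
  let right := (PySem.List.slice? (PySem.List.slice array (some (PySem.Int.floordiv n 2)) none) none none (-1)).getD []
  (left.zip right).map (fun p => p.1 * p.2)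

-- ===== PRECONDITION & SPEC =====
def Spec_multiply_pairs (array : List Int) (out : List Int) : Prop := out = multiply_pairs_alt array
instance (array : List Int) (out : List Int) : Decidable (Spec_multiply_pairs array out) := by unfold Spec_multiply_pairs; infer_instance

-- ===== CLAIM (what is proved, stated in full; the proofs are below) =====
def Claim_equal_multiply_pairs : Prop := ∀ (array : List Int), Dom_multiply_pairs array → Spec_multiply_pairs array (multiply_pairs array)

-- ===== LEMMAS AND PROOFS =====

-- canonical form both ports are reduced to
def pvCanon (array : List Int) : List Int :=
  (PySem.List.pyRange 0 (PySem.Int.floordiv ((array.length : Int) + 1) 2) 1).map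
    (fun i => PySem.List.pyGetD array i 0 * PySem.List.pyGetD array (-i - 1) 0)

theorem multiply_pairs_eq_canon (array : List Int) : multiply_pairs array = pvCanon array := by
  unfold multiply_pairs pvCanon
  simp only [PySem.Int.floordiv_eq_ediv_of_pos (by omega : (0:Int) < 2),
    PySem.Int.mod_eq_emod_of_pos (by omega : (0:Int) < 2),
    PySem.List.foldl_append_singleton_eq_map, List.nil_append]
  rcases Nat.even_or_odd array.length with ⟨k, hk⟩ | ⟨k, hk⟩
  · have h0 : (array.length : Int) % 2 ≠ 1 := by omega
    have h1 : ((array.length : Int) + 1) / 2 = (array.length : Int) / 2 := by omega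
    rw [h1, if_neg h0]
  · have h0 : (array.length : Int) % 2 = 1 := by omega
    have hd : (array.length : Int) / 2 = (k : Int) := by omega
    have h1 : ((array.length : Int) + 1) / 2 = (k : Int) + 1 := by omega
    rw [h1, hd, PySem.List.pyRange_one_succ_right (by omega), List.map_append,
        List.map_singleton, if_pos h0]
    have hneg : -(k : Int) - 1 = -(((k + 1 : Nat) : Int)) := by push_cast; ring
    have e1 : PySem.List.pyGetD array (-(k : Int) - 1) 0 = array.getD k 0 := by
      rw [hneg, PySem.List.pyGetD_neg_natCast _ _ _ (by omega) (by omega),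
          List.getD_eq_getElem array 0 (by omega)]
      congr 1; omega
    have e2 : PySem.List.pyGetD array ((k : Int)) 0 = array.getD k 0 :=
      PySem.List.pyGetD_natCast _ _ _
    rw [e1, e2, pow_two]

theorem multiply_pairs_alt_eq_canon (array : List Int) : multiply_pairs_alt array = pvCanon array := by
  unfold multiply_pairs_alt pvCanon
  have h2 : (0:Int) < 2 := by omega
  simp only [PySem.Int.floordiv_eq_ediv_of_pos h2, PySem.List.slice?_none_none_neg_one,
    Option.getD_some]
  set n : Nat := array.length with hn
  have hp : ((n : Int) + 1) / 2 = (((n + 1) / 2 : Nat) : Int) := by omega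
  have hq : (n : Int) / 2 = (((n / 2 : Nat)) : Int) := by omega
  rw [hp, hq, PySem.List.slice_to_natCast, PySem.List.slice_from_natCast]
  apply List.ext_getElem
  · simp [PySem.List.length_pyRange_one]
    omega
  · intro k hk1 hk2
    have hklt : k < (n + 1) / 2 := by
      simp [PySem.List.length_pyRange_one] at hk2; omega
    have hkn : k < n := by omega
    simp only [List.getElem_map, List.getElem_zip, List.getElem_take,
      List.getElem_reverse, List.getElem_drop, PySem.List.getElem_pyRange_one,
      List.length_drop]
    have e2 : PySem.List.pyGetD array ((0:Int) + (k:Int)) 0 = array[k] := by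
      rw [zero_add, PySem.List.pyGetD_natCast, List.getD_eq_getElem array 0 hkn]
    have hneg : -((0:Int) + (k:Int)) - 1 = -(((k + 1 : Nat) : Int)) := by push_cast; ring
    have e1 : PySem.List.pyGetD array (-((0:Int) + (k:Int)) - 1) 0 = array[n - 1 - k]'(by omega) := by
      rw [hneg, PySem.List.pyGetD_neg_natCast _ _ _ (by omega) (by omega),
          ← List.getD_eq_getElem array 0 (by omega : n - 1 - k < array.length),
          ← List.getD_eq_getElem array 0 (by omega : array.length - (k + 1) < array.length),
          show array.length - (k + 1) = n - 1 - k by omega]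
    rw [e1, e2,
        ← List.getD_eq_getElem array 0 (by omega : n - 1 - k < array.length),
        ← List.getD_eq_getElem array 0 (by omega : n / 2 + (array.length - n / 2 - 1 - k) < array.length),
        show n / 2 + (array.length - n / 2 - 1 - k) = n - 1 - k by omega]

-- ===== VERDICT (by name: the statement is the Claim_ definition above) =====
theorem multiply_pairs_spec : Claim_equal_multiply_pairs := by
  intro array _
  unfold Spec_multiply_pairs
  rw [multiply_pairs_eq_canon, multiply_pairs_alt_eq_canon]
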